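-- pv_equiv track=rewrite | github.com/Lambda-Biolab/bentolab | bentolab/tui/widgets/temp_chart.py | _bits_to_rows
-- ===== SOURCE A (Python) =====
-- _BRAILLE_BASE = 0x2800
--
-- _DOT_BITS = (
--     (0x01, 0x08),
--     (0x02, 0x10),
--     (0x04, 0x20),
--     (0x40, 0x80),
-- )
--
-- def _bits_to_rows(
--     block_bits: list[list[int]], lid_bits: list[list[int]], width: int, height: int
-- ) -> list[tuple[str, str]]:
--     rows: list[tuple[str, str]] = []
--     for cell_row in range(height):
--         block_chars = [_braille_cell(block_bits, cell_row, c) for c in range(width)]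
--         lid_chars = [_braille_cell(lid_bits, cell_row, c) for c in range(width)]
--         rows.append(("".join(block_chars), "".join(lid_chars)))
--     return rows
--
-- def _braille_cell(bits: list[list[int]], cell_row: int, cell_col: int) -> str:
--     code = _BRAILLE_BASE
--     for dy in range(4):
--         for dx in range(2):
--             if bits[cell_row * 4 + dy][cell_col * 2 + dx]:
--                 code |= _DOT_BITS[dy][dx]
--     return chr(code)
-- ===== SOURCE B (Python) =====
-- _BRAILLE_BASE = 0x2800
--
-- _DOT_BITS = (
--     (0x01, 0x08),
--     (0x02, 0x10),
--     (0x04, 0x20),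
--     (0x40, 0x80),
-- )
--
-- def _scatter_codes(bits, width, height):
--     codes = [[_BRAILLE_BASE] * width for _ in range(height)]
--     for y in range(height * 4):
--         for x in range(width * 2):
--             if bits[y][x]:
--                 codes[y // 4][x // 2] |= _DOT_BITS[y % 4][x % 2]
--     return codes
--
-- def _bits_to_rows(block_bits, lid_bits, width, height):
--     block_codes = _scatter_codes(block_bits, width, height)
--     lid_codes = _scatter_codes(lid_bits, width, height)
--     return [
--         ("".join(map(chr, br)), "".join(map(chr, lr)))
--         for br, lr in zip(block_codes, lid_codes)
--     ]
-- ===== Notes on version B (the rewrite author's own statement) =====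
-- stated objective: alternative
-- what changed: Replaces the per-cell gather helper (_braille_cell with nested dy/dx loops per character) by a scatter pass: a height-by-width code grid initialised to the braille base is built by one sweep over all bit positions ORing _DOT_BITS[y%4][x%2] into codes[y//4][x//2], and a second pass maps chr over the code rows and zips block and lid rows into the output.
import Mathlib
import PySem

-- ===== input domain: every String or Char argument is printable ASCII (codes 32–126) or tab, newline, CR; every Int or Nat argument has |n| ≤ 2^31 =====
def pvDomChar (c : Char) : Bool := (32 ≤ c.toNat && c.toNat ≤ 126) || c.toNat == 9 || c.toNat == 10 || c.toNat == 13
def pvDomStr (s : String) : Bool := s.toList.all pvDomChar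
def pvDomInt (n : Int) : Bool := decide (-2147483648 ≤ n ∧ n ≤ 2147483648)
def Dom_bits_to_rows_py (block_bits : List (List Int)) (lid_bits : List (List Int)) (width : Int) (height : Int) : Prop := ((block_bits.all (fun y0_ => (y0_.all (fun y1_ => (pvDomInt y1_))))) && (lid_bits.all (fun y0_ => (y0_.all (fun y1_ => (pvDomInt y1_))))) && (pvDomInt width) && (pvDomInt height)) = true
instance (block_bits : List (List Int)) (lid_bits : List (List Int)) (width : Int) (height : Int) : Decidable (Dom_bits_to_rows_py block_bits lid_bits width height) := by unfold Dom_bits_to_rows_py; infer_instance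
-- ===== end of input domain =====

-- B replaces A's per-cell gather helper by a scatter pass over all bit positions into a code grid,
-- then maps chr over the code rows; alternative decomposition, same asymptotic cost.


-- ===== PORT A =====
def pvBrailleBase : Int := 0x2800

def pvDotBits : List (List Int) := [[0x01, 0x08], [0x02, 0x10], [0x04, 0x20], [0x40, 0x80]]

-- _braille_cell: gather the 8 dots of one cell
def braille_cell (bits : List (List Int)) (cell_row : Int) (cell_col : Int) : Char :=
  let code := (PySem.List.pyRange 0 4 1).foldl (fun code dy =>
    (PySem.List.pyRange 0 2 1).foldl (fun code dx =>
      if PySem.List.pyGetD (PySem.List.pyGetD bits (cell_row * 4 + dy) []) (cell_col * 2 + dx) 0 ≠ 0 then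
        PySem.Int.bor code (PySem.List.pyGetD (PySem.List.pyGetD pvDotBits dy []) dx 0)
      else code) code) pvBrailleBase
  Char.ofNat code.toNat

def bits_to_rows_py (block_bits : List (List Int)) (lid_bits : List (List Int)) (width : Int) (height : Int) : List (String × String) :=
  (PySem.List.pyRange 0 height 1).foldl (fun rows cell_row =>
    let block_chars := (PySem.List.pyRange 0 width 1).map (fun c => braille_cell block_bits cell_row c)
    let lid_chars := (PySem.List.pyRange 0 width 1).map (fun c => braille_cell lid_bits cell_row c)
    rows ++ [(String.ofList block_chars, String.ofList lid_chars)]) []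

-- ===== PORT B =====
-- _scatter_codes: OR every set bit into codes[y//4][x//2]
def scatter_codes (bits : List (List Int)) (width : Int) (height : Int) : List (List Int) :=
  let codes := List.replicate height.toNat (List.replicate width.toNat pvBrailleBase)
  (PySem.List.pyRange 0 (height * 4) 1).foldl (fun codes y =>
    (PySem.List.pyRange 0 (width * 2) 1).foldl (fun codes x =>
      if PySem.List.pyGetD (PySem.List.pyGetD bits y []) x 0 ≠ 0 then
        PySem.List.pySetD codes (PySem.Int.floordiv y 4)
          (PySem.List.pySetD (PySem.List.pyGetD codes (PySem.Int.floordiv y 4) [])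
            (PySem.Int.floordiv x 2)
            (PySem.Int.bor
              (PySem.List.pyGetD (PySem.List.pyGetD codes (PySem.Int.floordiv y 4) []) (PySem.Int.floordiv x 2) 0)
              (PySem.List.pyGetD (PySem.List.pyGetD pvDotBits (PySem.Int.mod y 4) []) (PySem.Int.mod x 2) 0)))
      else codes) codes) codes

def bits_to_rows_py_alt (block_bits : List (List Int)) (lid_bits : List (List Int)) (width : Int) (height : Int) : List (String × String) :=
  let block_codes := scatter_codes block_bits width height
  let lid_codes := scatter_codes lid_bits width height
  (block_codes.zip lid_codes).map (fun p =>
    (String.ofList (p.1.map (fun c => Char.ofNat c.toNat)), String.ofList (p.2.map (fun c => Char.ofNat c.toNat))))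

-- ===== PRECONDITION & SPEC =====
-- Pre_ excludes exactly the inputs on which the Python A raises IndexError: when both height and
-- width are positive, each grid must have at least 4*height rows and each of those rows at least
-- 2*width entries.  (The two Lean ports are total and agree everywhere; Pre_ only marks where the
-- Python A raises.)
def Pre_bits_to_rows_py (block_bits : List (List Int)) (lid_bits : List (List Int)) (width : Int) (height : Int) : Prop :=
  0 < width → 0 < height →
    ((height * 4).toNat ≤ block_bits.length ∧
     (∀ row ∈ block_bits.take (height * 4).toNat, (width * 2).toNat ≤ row.length) ∧
     (height * 4).toNat ≤ lid_bits.length ∧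
     (∀ row ∈ lid_bits.take (height * 4).toNat, (width * 2).toNat ≤ row.length))

instance (block_bits : List (List Int)) (lid_bits : List (List Int)) (width : Int) (height : Int) : Decidable (Pre_bits_to_rows_py block_bits lid_bits width height) := by
  unfold Pre_bits_to_rows_py; infer_instance

def pvWitness_bits_to_rows_py : List (List Int) × List (List Int) × Int × Int :=
  ([[1, 0], [0, 0], [0, 0], [0, 1]], [[0, 1], [1, 0], [0, 0], [0, 0]], 1, 1)

def Spec_bits_to_rows_py (block_bits : List (List Int)) (lid_bits : List (List Int)) (width : Int) (height : Int) (out : List (String × String)) : Prop := out = bits_to_rows_py_alt block_bits lid_bits width height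
instance (block_bits : List (List Int)) (lid_bits : List (List Int)) (width : Int) (height : Int) (out : List (String × String)) : Decidable (Spec_bits_to_rows_py block_bits lid_bits width height out) := by unfold Spec_bits_to_rows_py; infer_instance

-- ===== CLAIM (what is proved, stated in full; the proofs are below) =====
def Claim_equal_bits_to_rows_py : Prop := ∀ (block_bits : List (List Int)) (lid_bits : List (List Int)) (width : Int) (height : Int), Dom_bits_to_rows_py block_bits lid_bits width height → Pre_bits_to_rows_py block_bits lid_bits width height → Spec_bits_to_rows_py block_bits lid_bits width height (bits_to_rows_py block_bits lid_bits width height)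

-- ===== LEMMAS AND PROOFS =====

-- Nat-indexed abstractions of B's scatter loop
def pvMaskN (y x : Nat) : Int := (pvDotBits.getD (y % 4) []).getD (x % 2) 0

def pvOrStep (bits : List (List Int)) (y x : Nat) (v : Int) : Int :=
  if (bits.getD y []).getD x 0 ≠ 0 then PySem.Int.bor v (pvMaskN y x) else v

def pvStepRow (bits : List (List Int)) (y : Nat) (row : List Int) (x : Nat) : List Int :=
  if (bits.getD y []).getD x 0 ≠ 0 then
    row.set (x / 2) (PySem.Int.bor (row.getD (x / 2) 0) (pvMaskN y x))
  else row

def pvPass (bits : List (List Int)) (w2 y : Nat) (row : List Int) : List Int :=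
  (List.range w2).foldl (pvStepRow bits y) row

def pvStepGrid (bits : List (List Int)) (w2 : Nat) (codes : List (List Int)) (y : Nat) : List (List Int) :=
  codes.set (y / 4) (pvPass bits w2 y (codes.getD (y / 4) []))

-- gather form of one cell code, in B's update order (which is also A's order)
def pvCellCode (bits : List (List Int)) (r c : Nat) : Int :=
  pvOrStep bits (4*r+3) (2*c+1) (pvOrStep bits (4*r+3) (2*c)
    (pvOrStep bits (4*r+2) (2*c+1) (pvOrStep bits (4*r+2) (2*c)
      (pvOrStep bits (4*r+1) (2*c+1) (pvOrStep bits (4*r+1) (2*c)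
        (pvOrStep bits (4*r) (2*c+1) (pvOrStep bits (4*r) (2*c) pvBrailleBase)))))))

-- cast helpers
lemma pvFd4 (k : Nat) : PySem.Int.floordiv (k : Int) 4 = ((k / 4 : Nat) : Int) := by
  exact_mod_cast PySem.Int.floordiv_natCast k 4
lemma pvFd2 (k : Nat) : PySem.Int.floordiv (k : Int) 2 = ((k / 2 : Nat) : Int) := by
  exact_mod_cast PySem.Int.floordiv_natCast k 2
lemma pvMd4 (k : Nat) : PySem.Int.mod (k : Int) 4 = ((k % 4 : Nat) : Int) := by
  exact_mod_cast PySem.Int.mod_natCast k 4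
lemma pvMd2 (k : Nat) : PySem.Int.mod (k : Int) 2 = ((k % 2 : Nat) : Int) := by
  exact_mod_cast PySem.Int.mod_natCast k 2

lemma pvRange0 (b : Int) : PySem.List.pyRange 0 b 1 = (List.range b.toNat).map (fun k : Nat => (k : Int)) := by
  rw [PySem.List.pyRange_one]; simp only [Int.sub_zero, zero_add]

-- getD/set toolbox
lemma pvGetD_set_self (l : List Int) (i : Nat) (h : i < l.length) (a d : Int) :
    (l.set i a).getD i d = a := by
  simp [List.getD_eq_getElem?_getD, h]

lemma pvGetD_set_self' (l : List (List Int)) (i : Nat) (h : i < l.length) (a : List Int) :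
    (l.set i a).getD i [] = a := by
  simp [List.getD_eq_getElem?_getD, h]

lemma pvGetD_set_ne (l : List Int) (i j : Nat) (h : i ≠ j) (a d : Int) :
    (l.set i a).getD j d = l.getD j d := by
  simp [List.getD_eq_getElem?_getD, List.getElem?_set_ne h]

lemma pvGetD_set_ne' (l : List (List Int)) (i j : Nat) (h : i ≠ j) (a : List Int) :
    (l.set i a).getD j [] = l.getD j [] := by
  simp [List.getD_eq_getElem?_getD, List.getElem?_set_ne h]

lemma pvSet_getD_self (l : List (List Int)) (i : Nat) :
    l.set i (l.getD i []) = l := by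
  rcases Nat.lt_or_ge i l.length with h | h
  · simp [List.getD_eq_getElem?_getD, List.getElem?_eq_getElem h, List.set_getElem_self]
  · exact List.set_eq_of_length_le h

lemma pvGetD_default (l : List (List Int)) (i : Nat) (h : l.length ≤ i) :
    l.getD i [] = [] := by
  simp [List.getD_eq_getElem?_getD, List.getElem?_eq_none_iff.mpr h]

-- row step basics
lemma pvStepRow_nil (bits : List (List Int)) (y x : Nat) : pvStepRow bits y [] x = [] := by
  unfold pvStepRow; split <;> simp

lemma pvFoldRow_nil (bits : List (List Int)) (y : Nat) (xs : List Nat) :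
    xs.foldl (pvStepRow bits y) [] = [] := by
  induction xs with
  | nil => rfl
  | cons a l ih => simp [List.foldl_cons, pvStepRow_nil, ih]

lemma pvPass_nil (bits : List (List Int)) (w2 y : Nat) : pvPass bits w2 y [] = [] :=
  pvFoldRow_nil bits y _

lemma pvFoldRow_length (bits : List (List Int)) (y : Nat) (xs : List Nat) :
    ∀ row : List Int, (xs.foldl (pvStepRow bits y) row).length = row.length := by
  induction xs with
  | nil => intro row; rfl
  | cons a l ih =>
      intro row
      rw [List.foldl_cons, ih]
      unfold pvStepRow; split <;> simp

lemma pvPass_length (bits : List (List Int)) (w2 y : Nat) (row : List Int) :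
    (pvPass bits w2 y row).length = row.length :=
  pvFoldRow_length bits y _ row

-- B's inner loop, atomized: the whole x-sweep for one y only rewrites row y/4
lemma pvInner_atomic (bits : List (List Int)) (k : Nat) (xs : List Nat) :
    ∀ codes : List (List Int),
      xs.foldl (fun codes j =>
        if (bits.getD k []).getD j 0 ≠ 0 then
          codes.set (k / 4) ((codes.getD (k / 4) []).set (j / 2)
            (PySem.Int.bor ((codes.getD (k / 4) []).getD (j / 2) 0) (pvMaskN k j)))
        else codes) codes
      = codes.set (k / 4) (xs.foldl (pvStepRow bits k) (codes.getD (k / 4) [])) := by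
  induction xs with
  | nil => intro codes; rw [List.foldl_nil, List.foldl_nil, pvSet_getD_self]
  | cons j xs ih =>
      intro codes
      rw [List.foldl_cons, List.foldl_cons]
      have hsr : ∀ row : List Int, (bits.getD k []).getD j 0 ≠ 0 →
          pvStepRow bits k row j = row.set (j / 2) (PySem.Int.bor (row.getD (j / 2) 0) (pvMaskN k j)) := by
        intro row hb; unfold pvStepRow; rw [if_pos hb]
      have hsr' : ∀ row : List Int, ¬ (bits.getD k []).getD j 0 ≠ 0 →
          pvStepRow bits k row j = row := by
        intro row hb; unfold pvStepRow; rw [if_neg hb]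
      by_cases hb : (bits.getD k []).getD j 0 ≠ 0
      · rw [if_pos hb, ih, List.set_set, hsr _ hb]
        rcases Nat.lt_or_ge (k / 4) codes.length with h | h
        · rw [pvGetD_set_self' _ _ h]
        · rw [List.set_eq_of_length_le (by simpa using h), List.set_eq_of_length_le h]
      · rw [if_neg hb, ih, hsr' _ hb]

-- scatter_codes in Nat form
lemma pvScatter_nat (bits : List (List Int)) (w h : Int) :
    scatter_codes bits w h
      = (List.range (h * 4).toNat).foldl (pvStepGrid bits (w * 2).toNat)
          (List.replicate h.toNat (List.replicate w.toNat pvBrailleBase)) := by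
  simp only [scatter_codes, pvRange0, List.foldl_map]
  congr 1
  funext codes k
  have hstep : (fun (codes : List (List Int)) (j : Nat) =>
      if PySem.List.pyGetD (PySem.List.pyGetD bits (k : Int) []) (j : Int) 0 ≠ 0 then
        PySem.List.pySetD codes (PySem.Int.floordiv (k : Int) 4)
          (PySem.List.pySetD (PySem.List.pyGetD codes (PySem.Int.floordiv (k : Int) 4) [])
            (PySem.Int.floordiv (j : Int) 2)
            (PySem.Int.bor
              (PySem.List.pyGetD (PySem.List.pyGetD codes (PySem.Int.floordiv (k : Int) 4) []) (PySem.Int.floordiv (j : Int) 2) 0)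
              (PySem.List.pyGetD (PySem.List.pyGetD pvDotBits (PySem.Int.mod (k : Int) 4) []) (PySem.Int.mod (j : Int) 2) 0)))
      else codes)
      = (fun (codes : List (List Int)) (j : Nat) =>
        if (bits.getD k []).getD j 0 ≠ 0 then
          codes.set (k / 4) ((codes.getD (k / 4) []).set (j / 2)
            (PySem.Int.bor ((codes.getD (k / 4) []).getD (j / 2) 0) (pvMaskN k j)))
        else codes) := by
    funext codes j
    simp only [pvFd4, pvFd2, pvMd4, pvMd2, PySem.List.pySetD_natCast, PySem.List.pyGetD_natCast, pvMaskN]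
  rw [hstep, pvInner_atomic bits k _ codes]
  rfl

-- grid-level length and projection
lemma pvGrid_length (bits : List (List Int)) (w2 : Nat) (ys : List Nat) :
    ∀ codes : List (List Int), (ys.foldl (pvStepGrid bits w2) codes).length = codes.length := by
  induction ys with
  | nil => intro codes; rfl
  | cons y ys ih => intro codes; rw [List.foldl_cons, ih]; simp [pvStepGrid]

lemma pvGrid_proj (bits : List (List Int)) (w2 : Nat) (r : Nat) (ys : List Nat) :
    ∀ codes : List (List Int),
      (ys.foldl (pvStepGrid bits w2) codes).getD r []
        = (ys.filter (fun y => decide (y / 4 = r))).foldl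
            (fun row y => pvPass bits w2 y row) (codes.getD r []) := by
  induction ys with
  | nil => intro codes; rfl
  | cons y ys ih =>
      intro codes
      rw [List.foldl_cons, ih, List.filter_cons]
      by_cases hy : y / 4 = r
      · simp only [hy, decide_true, if_pos, List.foldl_cons]
        congr 1
        unfold pvStepGrid
        rw [hy]
        rcases Nat.lt_or_ge r codes.length with h | h
        · rw [pvGetD_set_self' _ _ h]
        · rw [List.set_eq_of_length_le h, pvGetD_default _ _ h, pvPass_nil]
      · simp only [hy, decide_false, if_neg, Bool.false_eq_true, not_false_iff]
        congr 1
        unfold pvStepGrid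
        exact pvGetD_set_ne' _ _ _ (by omega) _

-- row-level projection
lemma pvRow_proj (bits : List (List Int)) (y c : Nat) (xs : List Nat) :
    ∀ row : List Int, c < row.length →
      (xs.foldl (pvStepRow bits y) row).getD c 0
        = (xs.filter (fun x => decide (x / 2 = c))).foldl
            (fun v x => pvOrStep bits y x v) (row.getD c 0) := by
  induction xs with
  | nil => intro row _; rfl
  | cons x xs ih =>
      intro row hc
      rw [List.foldl_cons, List.filter_cons]
      have hsr : (bits.getD y []).getD x 0 ≠ 0 →
          pvStepRow bits y row x = row.set (x / 2) (PySem.Int.bor (row.getD (x / 2) 0) (pvMaskN y x)) := by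
        intro hb; unfold pvStepRow; rw [if_pos hb]
      have hsr' : ¬ (bits.getD y []).getD x 0 ≠ 0 → pvStepRow bits y row x = row := by
        intro hb; unfold pvStepRow; rw [if_neg hb]
      have hor : (bits.getD y []).getD x 0 ≠ 0 → ∀ v : Int,
          pvOrStep bits y x v = PySem.Int.bor v (pvMaskN y x) := by
        intro hb v; unfold pvOrStep; rw [if_pos hb]
      have hor' : ¬ (bits.getD y []).getD x 0 ≠ 0 → ∀ v : Int, pvOrStep bits y x v = v := by
        intro hb v; unfold pvOrStep; rw [if_neg hb]
      by_cases hx : x / 2 = c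
      · simp only [hx, decide_true, if_pos, List.foldl_cons]
        by_cases hb : (bits.getD y []).getD x 0 ≠ 0
        · rw [hsr hb, hor hb, ih _ (by simpa using hc), hx, pvGetD_set_self _ _ hc]
        · rw [hsr' hb, hor' hb, ih _ hc]
      · simp only [hx, decide_false, if_neg, Bool.false_eq_true, not_false_iff]
        by_cases hb : (bits.getD y []).getD x 0 ≠ 0
        · rw [hsr hb, ih _ (by simpa using hc), pvGetD_set_ne _ _ _ (by omega)]
        · rw [hsr' hb, ih _ hc]

-- filters of ranges pick exactly one cell's positions
lemma pvFilter4 (m r : Nat) :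
    (List.range (4 * m)).filter (fun y => decide (y / 4 = r))
      = if r < m then [4*r, 4*r+1, 4*r+2, 4*r+3] else [] := by
  induction m with
  | zero => simp
  | succ m ih =>
      have hsplit : List.range (4 * (m + 1)) = List.range (4 * m) ++ [4*m, 4*m+1, 4*m+2, 4*m+3] := by
        have : 4 * (m + 1) = 4 * m + 4 := by ring
        rw [this, List.range_add]
        rfl
      rw [hsplit, List.filter_append, ih]
      have h0 : (4*m) / 4 = m := by omega
      have h1 : (4*m+1) / 4 = m := by omega
      have h2 : (4*m+2) / 4 = m := by omega
      have h3 : (4*m+3) / 4 = m := by omega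
      by_cases hr : r < m
      · have hne : m ≠ r := by omega
        simp [h0, h1, h2, h3, hne, hr, Nat.lt_succ_of_lt hr]
      · by_cases hrm : r = m
        · subst hrm
          simp [h0, h1, h2, h3]
        · have hlt : ¬ r < m + 1 := by omega
          have hne : m ≠ r := by omega
          simp [h0, h1, h2, h3, hr, hne, hlt]

lemma pvFilter2 (m c : Nat) :
    (List.range (2 * m)).filter (fun x => decide (x / 2 = c))
      = if c < m then [2*c, 2*c+1] else [] := by
  induction m with
  | zero => simp
  | succ m ih =>
      have hsplit : List.range (2 * (m + 1)) = List.range (2 * m) ++ [2*m, 2*m+1] := by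
        have : 2 * (m + 1) = 2 * m + 2 := by ring
        rw [this, List.range_add]
        rfl
      rw [hsplit, List.filter_append, ih]
      have h0 : (2*m) / 2 = m := by omega
      have h1 : (2*m+1) / 2 = m := by omega
      by_cases hc : c < m
      · have hne : m ≠ c := by omega
        simp [h0, h1, hne, hc, Nat.lt_succ_of_lt hc]
      · by_cases hcm : c = m
        · subst hcm
          simp [h0, h1]
        · have hlt : ¬ c < m + 1 := by omega
          have hne : m ≠ c := by omega
          simp [h0, h1, hc, hne, hlt]

-- one pass projected at column c
lemma pvPass_proj (bits : List (List Int)) (wn y c : Nat) (row : List Int)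
    (hc : c < row.length) (hlen : row.length = wn) :
    (pvPass bits (2 * wn) y row).getD c 0
      = pvOrStep bits y (2*c+1) (pvOrStep bits y (2*c) (row.getD c 0)) := by
  unfold pvPass
  rw [pvRow_proj bits y c _ row hc, pvFilter2, if_pos (by omega)]
  rfl

-- the scatter grid equals the gathered cell-code grid
lemma pvScatter_map (bits : List (List Int)) (w h : Int) :
    scatter_codes bits w h
      = (List.range h.toNat).map (fun r => (List.range w.toNat).map (fun c => pvCellCode bits r c)) := by
  rw [pvScatter_nat]
  have e4 : (h * 4).toNat = 4 * h.toNat := by omega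
  have e2 : (w * 2).toNat = 2 * w.toNat := by omega
  rw [e4, e2]
  set hn := h.toNat with hhn
  set wn := w.toNat with hwn
  set init := List.replicate hn (List.replicate wn pvBrailleBase) with hinit
  have hlen : ((List.range (4 * hn)).foldl (pvStepGrid bits (2 * wn)) init).length = hn := by
    rw [pvGrid_length]; simp [hinit]
  apply List.ext_getElem
  · simp [hlen]
  · intro r hr hr'
    simp only [List.getElem_map, List.getElem_range]
    have hrn : r < hn := by simpa [hlen] using hr
    have hgetD : ((List.range (4 * hn)).foldl (pvStepGrid bits (2 * wn)) init)[r]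
        = ((List.range (4 * hn)).foldl (pvStepGrid bits (2 * wn)) init).getD r [] := by
      rw [List.getD_eq_getElem?_getD, List.getElem?_eq_getElem hr]
      rfl
    rw [hgetD, pvGrid_proj, pvFilter4, if_pos hrn]
    have hinitr : init.getD r [] = List.replicate wn pvBrailleBase := by
      simp [hinit, List.getD_eq_getElem?_getD, hrn]
    rw [hinitr]
    set row0 := List.replicate wn pvBrailleBase with hrow0
    have l0 : row0.length = wn := by simp [hrow0]
    have l1 : (pvPass bits (2*wn) (4*r) row0).length = wn := by rw [pvPass_length, l0]
    have l2 : (pvPass bits (2*wn) (4*r+1) (pvPass bits (2*wn) (4*r) row0)).length = wn := by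
      rw [pvPass_length, l1]
    have l3 : (pvPass bits (2*wn) (4*r+2) (pvPass bits (2*wn) (4*r+1) (pvPass bits (2*wn) (4*r) row0))).length = wn := by
      rw [pvPass_length, l2]
    have l4 : (pvPass bits (2*wn) (4*r+3) (pvPass bits (2*wn) (4*r+2) (pvPass bits (2*wn) (4*r+1) (pvPass bits (2*wn) (4*r) row0)))).length = wn := by
      rw [pvPass_length, l3]
    simp only [List.foldl_cons, List.foldl_nil]
    apply List.ext_getElem
    · simp [l4]
    · intro c hc hc'
      simp only [List.getElem_map, List.getElem_range]
      have hcn : c < wn := by simpa [l4] using hc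
      have hgd : (pvPass bits (2*wn) (4*r+3) (pvPass bits (2*wn) (4*r+2) (pvPass bits (2*wn) (4*r+1) (pvPass bits (2*wn) (4*r) row0))))[c]
          = (pvPass bits (2*wn) (4*r+3) (pvPass bits (2*wn) (4*r+2) (pvPass bits (2*wn) (4*r+1) (pvPass bits (2*wn) (4*r) row0)))).getD c 0 := by
        rw [List.getD_eq_getElem?_getD, List.getElem?_eq_getElem hc]
        rfl
      rw [hgd,
        pvPass_proj bits wn _ c _ (by omega) l3,
        pvPass_proj bits wn _ c _ (by omega) l2,
        pvPass_proj bits wn _ c _ (by omega) l1,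
        pvPass_proj bits wn _ c _ (by omega) l0]
      have hbase : row0.getD c 0 = pvBrailleBase := by
        simp [hrow0, List.getD_eq_getElem?_getD, hcn]
      rw [hbase]
      simp [pvCellCode]

-- A's cell equals the gathered cell code
lemma pvBraille_cell_eq (bits : List (List Int)) (r c : Nat) :
    braille_cell bits (r : Int) (c : Int) = Char.ofNat (pvCellCode bits r c).toNat := by
  have h4 : PySem.List.pyRange 0 4 1 = [0, 1, 2, 3] := by decide
  have h2 : PySem.List.pyRange 0 2 1 = [0, 1] := by decide
  unfold braille_cell
  rw [h4, h2]
  simp only [List.foldl_cons, List.foldl_nil]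
  have er0 : ((r : Int) * 4 + 0) = ((4 * r : Nat) : Int) := by push_cast; ring
  have er1 : ((r : Int) * 4 + 1) = ((4 * r + 1 : Nat) : Int) := by push_cast; ring
  have er2 : ((r : Int) * 4 + 2) = ((4 * r + 2 : Nat) : Int) := by push_cast; ring
  have er3 : ((r : Int) * 4 + 3) = ((4 * r + 3 : Nat) : Int) := by push_cast; ring
  have ec0 : ((c : Int) * 2 + 0) = ((2 * c : Nat) : Int) := by push_cast; ring
  have ec1 : ((c : Int) * 2 + 1) = ((2 * c + 1 : Nat) : Int) := by push_cast; ring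
  simp only [er0, er1, er2, er3, ec0, ec1, PySem.List.pyGetD_natCast]
  have m0 : (4 * r) % 4 = 0 := by omega
  have m1 : (4 * r + 1) % 4 = 1 := by omega
  have m2 : (4 * r + 2) % 4 = 2 := by omega
  have m3 : (4 * r + 3) % 4 = 3 := by omega
  have n0 : (2 * c) % 2 = 0 := by omega
  have n1 : (2 * c + 1) % 2 = 1 := by omega
  simp [pvCellCode, pvOrStep, pvMaskN, m0, m1, m2, m3, n0, n1, pvDotBits,
    PySem.List.pyGetD, PySem.List.pyGet?, PySem.List.pyIdx?]

-- A in map form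
lemma pvA_map (block_bits lid_bits : List (List Int)) (w h : Int) :
    bits_to_rows_py block_bits lid_bits w h
      = (List.range h.toNat).map (fun r : Nat =>
          (String.ofList ((List.range w.toNat).map (fun c : Nat => braille_cell block_bits (r : Int) (c : Int))),
           String.ofList ((List.range w.toNat).map (fun c : Nat => braille_cell lid_bits (r : Int) (c : Int))))) := by
  simp only [bits_to_rows_py, pvRange0, List.foldl_map, List.map_map]
  simpa using PySem.List.foldl_append_singleton_eq_map
    (fun r : Nat =>
      (String.ofList ((List.range w.toNat).map (fun c : Nat => braille_cell block_bits (r : Int) (c : Int))),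
       String.ofList ((List.range w.toNat).map (fun c : Nat => braille_cell lid_bits (r : Int) (c : Int)))))
    (List.range h.toNat) []

-- ===== VERDICT (by name: the statement is the Claim_ definition above) =====
theorem bits_to_rows_py_spec : Claim_equal_bits_to_rows_py := by
  intro block_bits lid_bits width height _ _
  unfold Spec_bits_to_rows_py
  rw [pvA_map]
  simp only [bits_to_rows_py_alt]
  rw [pvScatter_map, pvScatter_map, List.zip_map']
  simp only [List.map_map, pvBraille_cell_eq, Function.comp_def]
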